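-- pv_equiv track=rewrite | github.com/dassh-dev/dassh | dassh/_se2anl/read_ascii_map_old.py | process_raw_str
-- ===== SOURCE A (Python) =====
-- def process_raw_str(ascii_str):
--     """Read raw ascii map into list of lists"""
--     asterisks = False
--     if '*' in ascii_str:
--         asterisks = True
--     tmp = ascii_str.splitlines()
--     map = []
--     for line in tmp:
--         if len(line) > 0 and not all([x == ' ' for x in line]):
--             map.append([v for v in line.split(' ') if v != ''])
--     # Remove asterisks, if they're there
--     if asterisks:
--         map = remove_asterisks(map)
--     return map
--
-- def remove_asterisks(processed_str):
--     """Remove asterisks used in SE2-ANL ascii maps to mark ducts, and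
--     all values outside of them"""
--     # Remove the sublists that have only asterisks, and all the values
--     # above (top) and below (bottom) them
--     asterisk_sublist = []
--     for i in range(len(processed_str)):
--         if all(val == '*' for val in processed_str[i]):
--             asterisk_sublist.append(i)
--
--     # Track who you want gone
--     top_to_remove = range(asterisk_sublist[0] + 1)
--     bot_to_remove = range(len(processed_str) - asterisk_sublist[1])
--
--     # Remove the top rows
--     for i in top_to_remove:
--         del processed_str[0]
--
--     # Remove the bottom rows
--     for i in bot_to_remove:
--         del processed_str[-1]
--
--     # Now remove the values outside the asterisks in each row
--     for i in range(len(processed_str)):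
--         # First asterisk
--         while True:
--             if processed_str[i][0] == '*':
--                 del processed_str[i][0]
--                 break
--             #
--             del processed_str[i][0]
--         #
--         # Second asterisk
--         while True:
--             if processed_str[i][-1] == '*':
--                 del processed_str[i][-1]
--                 break
--             #
--             del processed_str[i][-1]
--
--     # Clean out any stragglers: sometimes one gets put at the center
--     for i in range(len(processed_str)):
--         processed_str[i] = [x for x in processed_str[i] if x != '*']
--
--     return processed_str
-- ===== SOURCE B (Python) =====
-- def _strip_row(r):
--     first = r.index('*')
--     last = len(r) - 1 - r[::-1].index('*')
--     return [v for v in r[first + 1:last] if v != '*']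
--
-- def process_raw_str(ascii_str):
--     """Read raw ascii map into list of lists"""
--     rows = [[v for v in line.split(' ') if v != '']
--             for line in ascii_str.splitlines()
--             if len(line) > 0 and not all(x == ' ' for x in line)]
--     if '*' not in ascii_str:
--         return rows
--     ast = [i for i, r in enumerate(rows) if all(v == '*' for v in r)]
--     return [_strip_row(r) for r in rows[ast[0] + 1:ast[1]]]
-- ===== Notes on version B (the rewrite author's own statement) =====
-- stated objective: simpler
-- what changed: Replaces the four in-place del loops (popping rows off the top and bottom one at a time, then whittling each row element-by-element from both ends) by direct index computation: slice the rows strictly between the first two all-asterisk rows and, per row, slice strictly between the first and last asterisk found via index(); no list is mutated.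
import Mathlib
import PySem

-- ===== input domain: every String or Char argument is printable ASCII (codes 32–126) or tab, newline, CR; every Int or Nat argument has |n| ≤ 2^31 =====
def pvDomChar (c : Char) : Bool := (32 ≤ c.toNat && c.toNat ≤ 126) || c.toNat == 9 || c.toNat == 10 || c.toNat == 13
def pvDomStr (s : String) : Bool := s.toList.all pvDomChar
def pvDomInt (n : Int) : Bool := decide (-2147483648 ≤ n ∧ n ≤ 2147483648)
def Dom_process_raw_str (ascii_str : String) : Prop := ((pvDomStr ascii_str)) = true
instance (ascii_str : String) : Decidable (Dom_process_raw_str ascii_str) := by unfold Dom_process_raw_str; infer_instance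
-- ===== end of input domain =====

-- B replaces A's four in-place del loops by direct slicing between computed indices;
-- objective: simpler. A mutates its argument-derived lists in place; equivalence is about the return value.


-- shared sub-expressions of both Pythons: the line filter and the token split
def pvLineCond (line : String) : Bool :=
  decide (0 < PySem.Str.len line) && !(line.toList.all (fun x => x == ' '))

def pvToks (line : String) : List String :=
  ((PySem.Str.split? line " ").getD []).filter (fun v => v ≠ "")   -- sep ≠ "": split? is always some

def pvAllStar (r : List String) : Bool := r.all (fun v => v == "*")

-- ===== PORT A =====

-- the while-True loop deleting from the front until the deleted element is an asterisk
def pvFrontDel : List String → List String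
  | [] => []            -- Python raises IndexError here (excluded by Pre_)
  | x :: xs => if x == "*" then xs else pvFrontDel xs

-- the same while loop on the END of the row (del row[-1]); expressed via reverse
def pvBackDel (l : List String) : List String := (pvFrontDel l.reverse).reverse

def remove_asterisks (m : List (List String)) : List (List String) :=
  -- asterisk_sublist
  let ast : List Int := (PySem.List.pyRange 0 (PySem.List.len m) 1).foldl
      (fun acc i => if pvAllStar (PySem.List.pyGetD m i []) then acc ++ [i] else acc) []
  let a0 : Int := PySem.List.pyGetD ast 0 0   -- asterisk_sublist[0] (IndexError if absent: outside Pre_)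
  let a1 : Int := PySem.List.pyGetD ast 1 0
  -- for i in top_to_remove: del processed_str[0]
  let m1 := (PySem.List.pyRange 0 (a0 + 1) 1).foldl (fun l _ => l.tail) m
  -- for i in bot_to_remove: del processed_str[-1]
  let m2 := (PySem.List.pyRange 0 (PySem.List.len m - a1) 1).foldl (fun l _ => l.dropLast) m1
  -- strip each row from both ends with the two while loops
  let m3 := m2.map (fun r => pvBackDel (pvFrontDel r))
  -- clean out any stragglers
  m3.map (fun r => r.filter (fun x => x ≠ "*"))

def process_raw_str (ascii_str : String) : List (List String) :=
  let asterisks := PySem.Str.isIn "*" ascii_str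
  let tmp := PySem.Str.splitlines ascii_str
  let map := tmp.foldl (fun map line => if pvLineCond line then map ++ [pvToks line] else map) []
  if asterisks then remove_asterisks map else map

-- ===== PORT B =====

def pvStripRow (r : List String) : List String :=
  match PySem.List.index? r "*" with
  | none => []          -- Python raises ValueError here (excluded by Pre_)
  | some first =>
    match PySem.List.index? r.reverse "*" with    -- r[::-1] is reverse (slice?_none_none_neg_one)
    | none => []
    | some k =>
      let last : Int := PySem.List.len r - 1 - (k : Int)
      (PySem.List.slice r (some ((first : Int) + 1)) (some last)).filter (fun v => v ≠ "*")

def process_raw_str_alt (ascii_str : String) : List (List String) :=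
  let rows := ((PySem.Str.splitlines ascii_str).filter pvLineCond).map pvToks
  if !(PySem.Str.isIn "*" ascii_str) then rows
  else
    let ast : List Int := (PySem.List.enumerate rows 0).filterMap
        (fun p => if pvAllStar p.2 then some p.1 else none)
    let a0 : Int := PySem.List.pyGetD ast 0 0   -- ast[0] (IndexError if absent: outside Pre_)
    let a1 : Int := PySem.List.pyGetD ast 1 0
    (PySem.List.slice rows (some (a0 + 1)) (some a1)).map pvStripRow

-- ===== PRECONDITION & SPEC =====

-- the parsed rows of the map (input-shape description used by Pre_ only)
def pvRows (ascii_str : String) : List (List String) :=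
  ((PySem.Str.splitlines ascii_str).filter pvLineCond).map pvToks

-- indices of the all-asterisk rows
def pvAstIdxs (rows : List (List String)) : List Nat :=
  (List.range rows.length).filter (fun i => pvAllStar (rows.getD i []))

-- Pre_: exactly the inputs on which Python A returns. When an asterisk occurs, A's del loops raise
-- IndexError unless there are at least two all-asterisk rows and every row strictly between
-- the first two contains at least two asterisk entries.
def Pre_process_raw_str (ascii_str : String) : Prop :=
  PySem.Str.isIn "*" ascii_str = true →
    2 ≤ (pvAstIdxs (pvRows ascii_str)).length ∧
    ∀ r ∈ ((pvRows ascii_str).drop ((pvAstIdxs (pvRows ascii_str)).getD 0 0 + 1)).take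
          ((pvAstIdxs (pvRows ascii_str)).getD 1 0 - ((pvAstIdxs (pvRows ascii_str)).getD 0 0 + 1)),
      2 ≤ r.count "*"
instance (ascii_str : String) : Decidable (Pre_process_raw_str ascii_str) := by
  unfold Pre_process_raw_str; infer_instance

def pvWitness_process_raw_str : String := "* * *\n* 1 *\n* * *"

def Spec_process_raw_str (ascii_str : String) (out : List (List String)) : Prop := out = process_raw_str_alt ascii_str
instance (ascii_str : String) (out : List (List String)) : Decidable (Spec_process_raw_str ascii_str out) := by unfold Spec_process_raw_str; infer_instance

-- ===== CLAIM (what is proved, stated in full; the proofs are below) =====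
def Claim_equal_process_raw_str : Prop := ∀ (ascii_str : String), Dom_process_raw_str ascii_str → Pre_process_raw_str ascii_str → Spec_process_raw_str ascii_str (process_raw_str ascii_str)

-- ===== LEMMAS AND PROOFS =====

theorem pv_foldl_tail {α β : Type} (L : List α) (m : List β) :
    L.foldl (fun l _ => l.tail) m = m.drop L.length := by
  induction L generalizing m with
  | nil => simp
  | cons x L ih =>
    rw [List.foldl_cons, ih, ← List.drop_one, List.drop_drop]
    congr 1
    simp [Nat.add_comm]

theorem pv_foldl_dropLast {α β : Type} (L : List α) (m : List β) :
    L.foldl (fun l _ => l.dropLast) m = m.take (m.length - L.length) := by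
  induction L generalizing m with
  | nil => simp
  | cons x L ih =>
    rw [List.foldl_cons, ih, List.dropLast_eq_take, List.take_take]
    simp only [List.length_take, List.length_cons]
    congr 1
    omega

theorem pv_frontDel_append (pre suf : List String) (h : "*" ∉ pre) :
    pvFrontDel (pre ++ "*" :: suf) = suf := by
  induction pre with
  | nil => simp [pvFrontDel]
  | cons x pre ih =>
    have hx : x ≠ "*" := by intro he; exact h (by simp [he])
    simp only [List.cons_append, pvFrontDel, beq_iff_eq, hx, if_false]
    exact ih (fun hm => h (List.mem_cons_of_mem _ hm))

theorem pv_row_strip (r : List String) (h : 2 ≤ r.count "*") :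
    (pvBackDel (pvFrontDel r)).filter (fun x => x ≠ "*") = pvStripRow r := by
  have hm : "*" ∈ r := List.count_pos_iff.mp (by omega)
  obtain ⟨i, hi⟩ := Option.isSome_iff_exists.mp ((PySem.List.index?_isSome_iff r "*").mpr hm)
  obtain ⟨pre, suf, hr, hleni, hpre⟩ := (PySem.List.index?_eq_some_iff r "*" i).mp hi
  have hcsuf : 1 ≤ suf.count "*" := by
    have h0 : pre.count "*" = 0 := List.count_eq_zero.mpr hpre
    have h1 : r.count "*" = pre.count "*" + (suf.count "*" + 1) := by
      rw [hr]; simp [List.count_append]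
    omega
  have hmsufr : "*" ∈ suf.reverse := by
    rw [List.mem_reverse]; exact List.count_pos_iff.mp (by omega)
  obtain ⟨k, hk⟩ := Option.isSome_iff_exists.mp ((PySem.List.index?_isSome_iff suf.reverse "*").mpr hmsufr)
  obtain ⟨pre2, suf2, hsr, hlenk, hpre2⟩ := (PySem.List.index?_eq_some_iff suf.reverse "*" k).mp hk
  -- structure of suf from its reverse
  have hsuf : suf = suf2.reverse ++ "*" :: pre2.reverse := by
    have := congrArg List.reverse hsr
    simpa [List.reverse_append] using this
  -- index of the asterisk in r.reverse
  have hrrev : r.reverse = suf.reverse ++ "*" :: pre.reverse := by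
    rw [hr]; simp [List.reverse_append]
  have hkrev : PySem.List.index? r.reverse "*" = some k := by
    rw [hrrev, PySem.List.index?_append_of_mem _ hmsufr, hk]
  -- left side
  have hfd : pvFrontDel r = suf := by rw [hr]; exact pv_frontDel_append pre suf hpre
  have hbd : pvBackDel suf = suf2.reverse := by
    unfold pvBackDel
    rw [hsr, pv_frontDel_append pre2 suf2 hpre2]
  -- right side
  have hlen_suf : suf.length = suf2.length + 1 + pre2.length := by
    rw [hsuf]; simp; omega
  have hlast : PySem.List.len r - 1 - (k : Int) = ((pre.length + 1 + suf2.length : Nat) : Int) := by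
    have h1 : r.length = pre.length + 1 + suf.length := by rw [hr]; simp; omega
    rw [PySem.List.len_eq]
    push_cast
    omega
  rw [hfd, hbd]
  unfold pvStripRow
  rw [hi, hkrev]
  simp only [hlast]
  have hfirst : ((i : Int) + 1) = ((pre.length + 1 : Nat) : Int) := by
    rw [← hleni]; push_cast; ring
  rw [hfirst, PySem.List.slice_natCast]
  have hdrop : List.drop (pre.length + 1) r = suf := by
    rw [hr, show pre ++ "*" :: suf = (pre ++ ["*"]) ++ suf by simp]
    exact List.drop_left' (by simp)
  have htake : List.take (pre.length + 1 + suf2.length - (pre.length + 1)) suf = suf2.reverse := by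
    rw [show pre.length + 1 + suf2.length - (pre.length + 1) = suf2.length by omega, hsuf]
    exact List.take_left' (by simp)
  rw [hdrop, htake]

theorem pv_filterMap_if {α : Type} (p : α → Bool) (l : List α) :
    l.filterMap (fun x => if p x then some x else none) = l.filter p := by
  induction l with
  | nil => rfl
  | cons x l ih => by_cases h : p x <;> simp [h, ih]

theorem pv_ast_eq (rows : List (List String)) :
    (PySem.List.pyRange 0 (PySem.List.len rows) 1).filter
        (fun i => pvAllStar (PySem.List.pyGetD rows i []))
      = (pvAstIdxs rows).map (fun n : Nat => (n : Int)) := by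
  rw [PySem.List.len_eq, PySem.List.pyRange_zero_nat, List.filter_map]
  unfold pvAstIdxs
  have hc : ((fun i => pvAllStar (PySem.List.pyGetD rows i [])) ∘ (fun k : Nat => (k : Int)))
      = (fun i : Nat => pvAllStar (rows.getD i [])) := by
    funext i
    simp [Function.comp, PySem.List.pyGetD_natCast]
  rw [hc]

theorem pv_astB_eq (rows : List (List String)) :
    (PySem.List.enumerate rows 0).filterMap
        (fun p => if pvAllStar p.2 then some p.1 else none)
      = (pvAstIdxs rows).map (fun n : Nat => (n : Int)) := by
  rw [PySem.List.enumerate_eq_map_pyRange rows [], List.filterMap_map]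
  rw [show ((fun p : Int × List String => if pvAllStar p.2 then some p.1 else none) ∘
        (fun j => (j, PySem.List.pyGetD rows j [])))
      = (fun j => if pvAllStar (PySem.List.pyGetD rows j []) then some j else none) from rfl]
  rw [pv_filterMap_if, pv_ast_eq]

theorem pv_astA_eq (rows : List (List String)) :
    ((PySem.List.pyRange 0 (PySem.List.len rows) 1).foldl
      (fun acc i => if pvAllStar (PySem.List.pyGetD rows i []) then acc ++ [i] else acc) [])
      = (pvAstIdxs rows).map (fun n : Nat => (n : Int)) := by
  rw [PySem.List.foldl_append_if_eq_filter, List.nil_append, pv_ast_eq]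

theorem pv_main (rows : List (List String))
    (h2 : 2 ≤ (pvAstIdxs rows).length)
    (hcnt : ∀ r ∈ (rows.drop ((pvAstIdxs rows).getD 0 0 + 1)).take
          ((pvAstIdxs rows).getD 1 0 - ((pvAstIdxs rows).getD 0 0 + 1)), 2 ≤ r.count "*") :
    remove_asterisks rows =
      (PySem.List.slice rows
        (some (PySem.List.pyGetD ((PySem.List.enumerate rows 0).filterMap
          (fun p => if pvAllStar p.2 then some p.1 else none)) 0 0 + 1))
        (some (PySem.List.pyGetD ((PySem.List.enumerate rows 0).filterMap
          (fun p => if pvAllStar p.2 then some p.1 else none)) 1 0))).map pvStripRow := by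
  -- name the first two all-asterisk row indices
  obtain ⟨a0, a1, rest, heq⟩ : ∃ a0 a1 rest, pvAstIdxs rows = a0 :: a1 :: rest := by
    match hl : pvAstIdxs rows with
    | [] => rw [hl] at h2; simp at h2
    | [a] => rw [hl] at h2; simp at h2
    | a0 :: a1 :: rest => exact ⟨a0, a1, rest, rfl⟩
  have hpair : List.Pairwise (· < ·) (pvAstIdxs rows) := by
    unfold pvAstIdxs
    exact List.Pairwise.sublist List.filter_sublist List.pairwise_lt_range
  have ha01 : a0 < a1 := by
    rw [heq] at hpair
    exact (List.pairwise_cons.mp hpair).1 a1 (by simp)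
  have ha1 : a1 < rows.length := by
    have hmem : a1 ∈ pvAstIdxs rows := by rw [heq]; simp
    unfold pvAstIdxs at hmem
    exact List.mem_range.mp (List.mem_of_mem_filter hmem)
  -- both ast computations
  have hB := pv_astB_eq rows
  rw [heq] at hB
  rw [hB]
  have hg0 : PySem.List.pyGetD ((a0 :: a1 :: rest).map (fun n : Nat => (n : Int))) 0 0 = (a0 : Int) := by
    simp [PySem.List.pyGetD_zero_cons]
  have hg1 : PySem.List.pyGetD ((a0 :: a1 :: rest).map (fun n : Nat => (n : Int))) 1 0 = (a1 : Int) := by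
    rw [PySem.List.pyGetD_ofNat']
    simp
  rw [hg0, hg1]
  -- the A side
  simp only [remove_asterisks]
  rw [pv_astA_eq rows, heq]
  rw [hg0, hg1]
  rw [pv_foldl_tail, pv_foldl_dropLast]
  rw [PySem.List.length_pyRange_one, PySem.List.length_pyRange_one, PySem.List.len_eq]
  have e1 : ((a0 : Int) + 1 - 0).toNat = a0 + 1 := by omega
  have e2 : (((rows.length : Int)) - (a1 : Int) - 0).toNat = rows.length - a1 := by omega
  rw [e1, e2]
  have e3 : (rows.drop (a0 + 1)).length - (rows.length - a1) = a1 - (a0 + 1) := by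
    rw [List.length_drop]; omega
  rw [e3]
  -- the B side slice
  have e4 : ((a0 : Int) + 1) = ((a0 + 1 : Nat) : Int) := by push_cast; ring
  rw [e4, PySem.List.slice_natCast]
  -- per-row equality
  rw [List.map_map]
  apply List.map_congr_left
  intro r hr
  have hcr : 2 ≤ r.count "*" := by
    apply hcnt
    rw [heq]
    simpa using hr
  exact pv_row_strip r hcr

-- ===== VERDICT (by name: the statement is the Claim_ definition above) =====
theorem process_raw_str_spec : Claim_equal_process_raw_str := by
  intro s _ hpre
  unfold Spec_process_raw_str
  have hA : process_raw_str s =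
      if PySem.Str.isIn "*" s then remove_asterisks (pvRows s) else pvRows s := by
    simp only [process_raw_str, pvRows, PySem.List.foldl_append_if, List.nil_append]
  by_cases hast : PySem.Str.isIn "*" s = true
  · obtain ⟨h2, hcnt⟩ := hpre hast
    rw [hA, if_pos hast]
    simp only [process_raw_str_alt, hast, Bool.not_true, Bool.false_eq_true, if_false]
    exact pv_main (pvRows s) h2 hcnt
  · rw [hA, if_neg hast]
    have hf : PySem.Chars.isIn ['*'] s.toList = false := by
      cases h : PySem.Chars.isIn ['*'] s.toList
      · rfl
      · exact absurd (show PySem.Str.isIn "*" s = true by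
          rw [PySem.Str.isIn_eq]; exact h) hast
    simp [process_raw_str_alt, pvRows, hf]
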